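-- pv_equiv track=rewrite | github.com/kryptobilanz-dev/kryptobilanz-dev.github.io | taxtrack/tools/auto_fix_loop.py | _pick_top_issue
-- ===== SOURCE A (Python) =====
-- from typing import List, Optional, Tuple
--
-- def _classify(line: str, *, from_critical: bool) -> Optional[str]:
--     s = line.strip()
--     if "[DATA LOSS]" in s and "unified swap" in s:
--         return "DATA_LOSS_SWAP"
--     if "[DATA LOSS]" in s:
--         return "DATA_LOSS_DISPOSAL"
--     if "[DOUBLE]" in s:
--         return "DOUBLE"
--     if "[FEE]" in s:
--         return "FEE"
--     if "[TAX]" in s: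
--         if from_critical or ("diff" in s.lower() and "tax_ready" in s.lower()):
--             return "TAX_MISMATCH"
--         return "TAX_REPORTING"
--     if "[PRICE]" in s:
--         return "PRICE"
--     return None
--
-- PRIORITY = {
--     "DATA_LOSS_SWAP": 1,
--     "DATA_LOSS_DISPOSAL": 2,
--     "DOUBLE": 3,
--     "FEE": 4,
--     "TAX_MISMATCH": 5,
--     "TAX_REPORTING": 6,
--     "PRICE": 7,
-- }
--
-- def _pick_top_issue(
--     critical: List[str], warnings: List[str]
-- ) -> Tuple[str, str, str]:
--     """
--     Returns (issue_type, priority_name, raw_line).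
--     """
--     candidates: List[Tuple[int, str, str]] = []
--     for line in critical:
--         k = _classify(line, from_critical=True)
--         if k and k in PRIORITY:
--             candidates.append((PRIORITY[k], k, line))
--     for line in warnings:
--         k = _classify(line, from_critical=False)
--         if k and k in PRIORITY:
--             candidates.append((PRIORITY[k], k, line))
--     if not candidates:
--         return ("NONE", "NONE", "")
--     candidates.sort(key=lambda x: x[0])
--     rank, key, line = candidates[0]
--     return (key, line, line)
-- ===== SOURCE B (Python) =====
-- from typing import List, Optional, Tuple
--
-- def _classify(line: str, *, from_critical: bool) -> Optional[str]:
--     s = line.strip()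
--     if "[DATA LOSS]" in s and "unified swap" in s:
--         return "DATA_LOSS_SWAP"
--     if "[DATA LOSS]" in s:
--         return "DATA_LOSS_DISPOSAL"
--     if "[DOUBLE]" in s:
--         return "DOUBLE"
--     if "[FEE]" in s:
--         return "FEE"
--     if "[TAX]" in s:
--         if from_critical or ("diff" in s.lower() and "tax_ready" in s.lower()):
--             return "TAX_MISMATCH"
--         return "TAX_REPORTING"
--     if "[PRICE]" in s:
--         return "PRICE"
--     return None
--
-- PRIORITY = {
--     "DATA_LOSS_SWAP": 1,
--     "DATA_LOSS_DISPOSAL": 2,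
--     "DOUBLE": 3,
--     "FEE": 4,
--     "TAX_MISMATCH": 5,
--     "TAX_REPORTING": 6,
--     "PRICE": 7,
-- }
--
-- def _pick_top_issue(
--     critical: List[str], warnings: List[str]
-- ) -> Tuple[str, str, str]:
--     """Single pass keeping the first best candidate; no list, no sort."""
--     best: Optional[Tuple[int, str, str]] = None
--     for flag, lines in ((True, critical), (False, warnings)):
--         for line in lines:
--             k = _classify(line, from_critical=flag)
--             p = PRIORITY.get(k) if k else None
--             if p is not None and (best is None or p < best[0]):
--                 best = (p, k, line)
--     if best is None:
--         return ("NONE", "NONE", "")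
--     return (best[1], best[2], best[2])
-- ===== Notes on version B (the rewrite author's own statement) =====
-- stated objective: simpler
-- what changed: A collects all classified candidates into a list and stable-sorts it by priority to take the first; B makes a single pass over critical then warnings keeping only the first candidate of strictly smallest priority, with no candidate list and no sort.
import Mathlib
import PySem

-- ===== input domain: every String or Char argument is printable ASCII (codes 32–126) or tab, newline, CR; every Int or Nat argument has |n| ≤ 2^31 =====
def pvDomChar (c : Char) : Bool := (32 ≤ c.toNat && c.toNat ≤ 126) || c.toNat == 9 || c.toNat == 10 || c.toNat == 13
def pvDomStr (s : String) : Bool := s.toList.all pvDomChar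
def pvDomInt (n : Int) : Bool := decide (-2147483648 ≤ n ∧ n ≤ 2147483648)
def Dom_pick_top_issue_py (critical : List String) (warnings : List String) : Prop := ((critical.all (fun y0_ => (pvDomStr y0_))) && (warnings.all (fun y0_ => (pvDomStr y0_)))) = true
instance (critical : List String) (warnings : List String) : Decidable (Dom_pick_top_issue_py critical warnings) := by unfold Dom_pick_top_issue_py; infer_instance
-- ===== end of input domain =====

-- B replaces A's collect-all-candidates-then-sort with a single pass keeping the first
-- best candidate (strict-min accumulator); objective: simpler (no list, no sort).

-- shared helper: the module-level _classify (used verbatim by both Pythons)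
def pyClassify (line : String) (from_critical : Bool) : Option String :=
  let s := PySem.Str.strip line
  if PySem.Str.isIn "[DATA LOSS]" s && PySem.Str.isIn "unified swap" s then some "DATA_LOSS_SWAP"
  else if PySem.Str.isIn "[DATA LOSS]" s then some "DATA_LOSS_DISPOSAL"
  else if PySem.Str.isIn "[DOUBLE]" s then some "DOUBLE"
  else if PySem.Str.isIn "[FEE]" s then some "FEE"
  else if PySem.Str.isIn "[TAX]" s then
    (if from_critical || (PySem.Str.isIn "diff" (PySem.Str.lower s) && PySem.Str.isIn "tax_ready" (PySem.Str.lower s))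
     then some "TAX_MISMATCH" else some "TAX_REPORTING")
  else if PySem.Str.isIn "[PRICE]" s then some "PRICE"
  else none

-- shared helper: the module-level PRIORITY dict
def pyPRIORITY : PySem.Dict String Int :=
  ⟨[("DATA_LOSS_SWAP", 1), ("DATA_LOSS_DISPOSAL", 2), ("DOUBLE", 3), ("FEE", 4),
   ("TAX_MISMATCH", 5), ("TAX_REPORTING", 6), ("PRICE", 7)]⟩

-- ===== PORT A =====
-- loop body of A: append (PRIORITY[k], k, line) when k is truthy and k in PRIORITY
def pickACandStep (flag : Bool) (acc : List (Int × String × String)) (line : String) :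
    List (Int × String × String) :=
  match pyClassify line flag with
  | none => acc
  | some k =>
    match PySem.Dict.get? pyPRIORITY k with
    | some p => acc ++ [(p, k, line)]
    | none => acc

def pick_top_issue_py (critical : List String) (warnings : List String) : String × String × String :=
  -- cands = critical pass, then warnings pass appended onto it (Python's two for-loops)
  if (warnings.foldl (pickACandStep false) (critical.foldl (pickACandStep true) [])).isEmpty
  then ("NONE", "NONE", "")
  else
    match PySem.List.sorted (warnings.foldl (pickACandStep false) (critical.foldl (pickACandStep true) [])) (fun x => x.1) with
    | (_, key, line) :: _ => (key, line, line)
    | [] => ("NONE", "NONE", "")   -- unreachable: sorted of a nonempty list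

-- ===== PORT B =====
-- loop body of B: keep best = first candidate of strictly smallest priority
def pickBStep (flag : Bool) (best : Option (Int × String × String)) (line : String) :
    Option (Int × String × String) :=
  match pyClassify line flag with
  | none => best
  | some k =>
    match PySem.Dict.get? pyPRIORITY k with
    | none => best
    | some p =>
      match best with
      | none => some (p, k, line)
      | some b => if p < b.1 then some (p, k, line) else best

def pick_top_issue_py_alt (critical : List String) (warnings : List String) : String × String × String :=
  -- best = warnings pass folded after the critical pass (B's two loops)
  match warnings.foldl (pickBStep false) (critical.foldl (pickBStep true) none) with
  | none => ("NONE", "NONE", "")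
  | some (_, k, l) => (k, l, l)

-- ===== PRECONDITION & SPEC =====
def Spec_pick_top_issue_py (critical : List String) (warnings : List String) (out : String × String × String) : Prop := out = pick_top_issue_py_alt critical warnings
instance (critical : List String) (warnings : List String) (out : String × String × String) : Decidable (Spec_pick_top_issue_py critical warnings out) := by unfold Spec_pick_top_issue_py; infer_instance

-- ===== CLAIM (what is proved, stated in full; the proofs are below) =====
def Claim_equal_pick_top_issue_py : Prop := ∀ (critical : List String) (warnings : List String), Dom_pick_top_issue_py critical warnings → Spec_pick_top_issue_py critical warnings (pick_top_issue_py critical warnings)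

-- ===== LEMMAS AND PROOFS =====

-- the strict-min accumulator step, on candidate triples
def minStep (best : Option (Int × String × String)) (c : Int × String × String) :
    Option (Int × String × String) :=
  match best with
  | none => some c
  | some b => if c.1 < b.1 then some c else best

-- A's candidate loop only ever appends to the accumulator
theorem candStep_append (flag : Bool) (lines : List String) :
    ∀ acc, lines.foldl (pickACandStep flag) acc = acc ++ lines.foldl (pickACandStep flag) [] := by
  induction lines with
  | nil => simp
  | cons x xs ih =>
    intro acc
    simp only [List.foldl_cons]
    rw [ih (pickACandStep flag acc x), ih (pickACandStep flag [] x)]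
    cases h : pyClassify x flag with
    | none => simp [pickACandStep, h]
    | some k => cases hp : PySem.Dict.get? pyPRIORITY k <;> simp [pickACandStep, h, hp]

-- one line of B's loop = folding minStep over the candidates that line contributes
theorem bstep_eq_minfold (flag : Bool) (x : String) (b : Option (Int × String × String)) :
    pickBStep flag b x = (pickACandStep flag [] x).foldl minStep b := by
  cases h : pyClassify x flag with
  | none => simp [pickBStep, pickACandStep, h]
  | some k =>
    cases hp : PySem.Dict.get? pyPRIORITY k with
    | none => simp [pickBStep, pickACandStep, h, hp]
    | some p => cases b <;> simp [pickBStep, pickACandStep, minStep, h, hp]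

-- B's loop over lines is the minStep fold over A's candidate list
theorem bfold_eq_minfold (flag : Bool) (lines : List String) :
    ∀ b, lines.foldl (pickBStep flag) b = (lines.foldl (pickACandStep flag) []).foldl minStep b := by
  induction lines with
  | nil => simp
  | cons x xs ih =>
    intro b
    simp only [List.foldl_cons]
    rw [ih (pickBStep flag b x), bstep_eq_minfold,
        candStep_append flag xs (pickACandStep flag [] x), List.foldl_append]

-- the strict-min fold computes the head of the stable sort by priority
theorem minfold_eq_sorted_head (c : List (Int × String × String)) :
    c.foldl minStep none = (PySem.List.sorted c (fun x => x.1)).head? := by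
  induction c using List.reverseRecOn with
  | nil => simp [PySem.List.sorted]
  | append_singleton t x ih =>
    rw [PySem.List.sorted_eq_foldl_insertBy, List.foldl_append, List.foldl_append,
        ← PySem.List.sorted_eq_foldl_insertBy]
    simp only [List.foldl_cons, List.foldl_nil]
    rw [ih]
    cases h : PySem.List.sorted t (fun x => x.1) with
    | nil => simp [minStep, PySem.List.insertBy]
    | cons y ys =>
      simp only [List.head?_cons, minStep, PySem.List.insertBy]
      by_cases hlt : x.1 < y.1 <;> simp [hlt]

-- ===== VERDICT (by name: the statement is the Claim_ definition above) =====
theorem pick_top_issue_py_spec : Claim_equal_pick_top_issue_py := by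
  intro critical warnings _
  unfold Spec_pick_top_issue_py pick_top_issue_py pick_top_issue_py_alt
  rw [bfold_eq_minfold false warnings, bfold_eq_minfold true critical,
      ← List.foldl_append, minfold_eq_sorted_head,
      candStep_append false warnings (critical.foldl (pickACandStep true) [])]
  cases hsd : PySem.List.sorted
      (critical.foldl (pickACandStep true) [] ++ warnings.foldl (pickACandStep false) [])
      (fun x => x.1) with
  | nil =>
    have h : critical.foldl (pickACandStep true) [] ++ warnings.foldl (pickACandStep false) [] = [] :=
      (PySem.List.sorted_eq_nil_iff _ _ _).mp hsd
    simp [hsd, h]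
  | cons m t =>
    have h : critical.foldl (pickACandStep true) [] ++ warnings.foldl (pickACandStep false) [] ≠ [] := by
      intro he
      rw [(PySem.List.sorted_eq_nil_iff _ _ _).mpr he] at hsd
      cases hsd
    simp [hsd, List.isEmpty_iff, h]
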